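-- pv_equiv track=rewrite | github.com/AMGrobelnik/ai-invention-3bc3de-sentence-length-standardization-reveals- | dataset_iter1_ud_ddm_records/src/data.py | parse_feats
-- ===== SOURCE A (Python) =====
-- def parse_feats(feats_str: str | None) -> dict[str, str]:
--     """Parse 'Case=Nom|Number=Sing' into {'Case': 'Nom', 'Number': 'Sing'}."""
--     if not feats_str:
--         return {}
--     result = {}
--     for pair in feats_str.split("|"):
--         if "=" in pair:
--             k, v = pair.split("=", 1)
--             result[k] = v
--     return result
-- ===== SOURCE B (Python) =====
-- def parse_feats(feats_str):
--     """Parse 'Case=Nom|Number=Sing' into {'Case': 'Nom', 'Number': 'Sing'}."""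
--     if not feats_str:
--         return {}
--     result = {}
--     key = None   # None while still reading the key part of the current pair
--     buf = []
--     for c in feats_str:
--         if c == "|":
--             if key is not None:
--                 result[key] = "".join(buf)
--             key = None
--             buf = []
--         elif c == "=" and key is None:
--             key = "".join(buf)
--             buf = []
--         else:
--             buf.append(c)
--     if key is not None:
--         result[key] = "".join(buf)
--     return result
-- ===== Notes on version B (the rewrite author's own statement) =====
-- stated objective: alternative
-- what changed: B replaces A's split-on-'|' plus split-on-'=' pipeline with a single character-by-character scan that maintains a pending key and a buffer, flushing into the dict at each '|' and at the end.
import Mathlib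
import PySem

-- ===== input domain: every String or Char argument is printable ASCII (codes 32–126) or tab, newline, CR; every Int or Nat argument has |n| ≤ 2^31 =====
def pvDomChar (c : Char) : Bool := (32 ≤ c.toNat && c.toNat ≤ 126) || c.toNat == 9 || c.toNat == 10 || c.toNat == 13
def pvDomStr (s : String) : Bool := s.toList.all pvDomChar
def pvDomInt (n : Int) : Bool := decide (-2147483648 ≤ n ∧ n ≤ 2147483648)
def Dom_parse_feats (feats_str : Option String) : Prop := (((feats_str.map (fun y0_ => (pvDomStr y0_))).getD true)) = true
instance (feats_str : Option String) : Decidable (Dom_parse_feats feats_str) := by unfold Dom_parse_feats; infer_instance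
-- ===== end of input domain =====

-- B replaces A's split/split/dict pipeline by a single character-by-character scan with a key/buffer state (alternative decomposition, same cost).

-- ===== PORT A =====
-- A: split on '|', and for each pair containing '=' split once on '=' and overwrite in a dict.
def parse_feats (feats_str : Option String) : List (String × String) :=
  match feats_str with
  | none => []
  | some s =>
    if s.toList = [] then []        -- "if not feats_str" (empty string is falsy)
    else
      (((PySem.Chars.splitOn s.toList ['|']).foldl
          (fun (d : PySem.Dict (List Char) (List Char)) pair =>
            if PySem.Chars.isIn ['='] pair then
              match PySem.Chars.splitOnMax pair ['='] 1 with
              | [k, v] => d.insert k v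
              | _ => d                -- unreachable: split(sep, 1) with sep present gives two pieces
            else d)
          PySem.Dict.empty).items).map (fun kv => (String.ofList kv.1, String.ofList kv.2))

-- ===== PORT B =====
-- final flush of Source B's scan state: pending key (if any) is written to the dict
def pfFinish (st : PySem.Dict (List Char) (List Char) × Option (List Char) × List Char) :
    PySem.Dict (List Char) (List Char) :=
  match st.2.1 with
  | some k => st.1.insert k st.2.2
  | none => st.1

-- one scan step of Source B's loop: state = (result dict, optional current key, current buffer)
def pfScanStep (st : PySem.Dict (List Char) (List Char) × Option (List Char) × List Char)
    (c : Char) : PySem.Dict (List Char) (List Char) × Option (List Char) × List Char :=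
  match st with
  | (d, okey, buf) =>
    if c = '|' then
      ((match okey with | some k => d.insert k buf | none => d), none, [])
    else if c = '=' ∧ okey = none then
      (d, some buf, [])
    else
      (d, okey, buf ++ [c])

def parse_feats_alt (feats_str : Option String) : List (String × String) :=
  match feats_str with
  | none => []
  | some s =>
    if s.toList = [] then []
    else
      (pfFinish (s.toList.foldl pfScanStep (PySem.Dict.empty, none, []))).items.map (fun kv => (String.ofList kv.1, String.ofList kv.2))

-- ===== PRECONDITION & SPEC =====
def Spec_parse_feats (feats_str : Option String) (out : List (String × String)) : Prop := out = parse_feats_alt feats_str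
instance (feats_str : Option String) (out : List (String × String)) : Decidable (Spec_parse_feats feats_str out) := by unfold Spec_parse_feats; infer_instance

-- ===== CLAIM (what is proved, stated in full; the proofs are below) =====
def Claim_equal_parse_feats : Prop := ∀ (feats_str : Option String), Dom_parse_feats feats_str → Spec_parse_feats feats_str (parse_feats feats_str)

-- ===== LEMMAS AND PROOFS =====

-- split on '|' as a structural recursion: (first segment, remaining segments)
def splitBar : List Char → List Char × List (List Char)
  | [] => ([], [])
  | c :: cs =>
    let r := splitBar cs
    if c = '|' then ([], r.1 :: r.2) else (c :: r.1, r.2)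

-- split at the first '=' (none if absent)
def splitEq : List Char → Option (List Char × List Char)
  | [] => none
  | c :: cs => if c = '=' then some ([], cs) else (splitEq cs).map (fun ab => (c :: ab.1, ab.2))

-- A's per-pair action, in terms of splitEq
def procA (d : PySem.Dict (List Char) (List Char)) (pair : List Char) :
    PySem.Dict (List Char) (List Char) :=
  match splitEq pair with
  | none => d
  | some (a, b) => d.insert a b

theorem splitOn_go_bar (l : List Char) : ∀ (fuel : Nat) (cur : List Char) (acc : List (List Char)),
    l.length ≤ fuel →
    PySem.Chars.splitOn.go ['|'] fuel l cur acc
      = acc.reverse ++ ((cur.reverse ++ (splitBar l).1) :: (splitBar l).2) := by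
  induction l with
  | nil =>
    intro fuel cur acc _
    cases fuel <;> simp [PySem.Chars.splitOn.go, splitBar]
  | cons c rest ih =>
    intro fuel cur acc h
    cases fuel with
    | zero => simp at h
    | succ f =>
      by_cases hc : c = '|'
      · subst hc
        rw [show PySem.Chars.splitOn.go ['|'] (f+1) ('|' :: rest) cur acc
              = PySem.Chars.splitOn.go ['|'] f rest [] (cur.reverse :: acc) by
            simp [PySem.Chars.splitOn.go, List.isPrefixOf]]
        rw [ih f [] (cur.reverse :: acc) (by simpa using Nat.le_of_succ_le_succ h)]
        simp [splitBar]
      · rw [show PySem.Chars.splitOn.go ['|'] (f+1) (c :: rest) cur acc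
              = PySem.Chars.splitOn.go ['|'] f rest (c :: cur) acc by
            simp [PySem.Chars.splitOn.go, List.isPrefixOf, Ne.symm hc]]
        rw [ih f (c :: cur) acc (by simpa using Nat.le_of_succ_le_succ h)]
        simp [splitBar, hc]

theorem splitOn_bar (s : List Char) :
    PySem.Chars.splitOn s ['|'] = (splitBar s).1 :: (splitBar s).2 := by
  have := splitOn_go_bar s (s.length + 1) [] [] (Nat.le_succ _)
  simpa [PySem.Chars.splitOn] using this

theorem splitOnMax_go_zero (sep l cur : List Char) (acc : List (List Char)) (fuel : Nat) :
    PySem.Chars.splitOnMax.go sep fuel 0 l cur acc = acc.reverse ++ [cur.reverse ++ l] := by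
  cases fuel <;> cases l <;> simp [PySem.Chars.splitOnMax.go]

theorem splitOnMax_go_eq (l : List Char) : ∀ (fuel : Nat) (cur : List Char) (acc : List (List Char)),
    l.length ≤ fuel →
    PySem.Chars.splitOnMax.go ['='] fuel 1 l cur acc
      = acc.reverse ++ (match splitEq l with
          | none => [cur.reverse ++ l]
          | some (a, b) => [cur.reverse ++ a, b]) := by
  induction l with
  | nil =>
    intro fuel cur acc _
    cases fuel <;> simp [PySem.Chars.splitOnMax.go, splitEq]
  | cons c rest ih =>
    intro fuel cur acc h
    cases fuel with
    | zero => simp at h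
    | succ f =>
      by_cases hc : c = '='
      · subst hc
        rw [show PySem.Chars.splitOnMax.go ['='] (f+1) 1 ('=' :: rest) cur acc
              = PySem.Chars.splitOnMax.go ['='] f 0 rest [] (cur.reverse :: acc) by
            simp [PySem.Chars.splitOnMax.go, List.isPrefixOf]]
        rw [splitOnMax_go_zero]
        simp [splitEq]
      · rw [show PySem.Chars.splitOnMax.go ['='] (f+1) 1 (c :: rest) cur acc
              = PySem.Chars.splitOnMax.go ['='] f 1 rest (c :: cur) acc by
            simp [PySem.Chars.splitOnMax.go, List.isPrefixOf, Ne.symm hc]]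
        rw [ih f (c :: cur) acc (by simpa using Nat.le_of_succ_le_succ h)]
        cases hse : splitEq rest with
        | none => simp [splitEq, hc, hse]
        | some ab => simp [splitEq, hc, hse]

theorem splitOnMax_eq (pair : List Char) :
    PySem.Chars.splitOnMax pair ['='] 1
      = (match splitEq pair with
          | none => [pair]
          | some (a, b) => [a, b]) := by
  have := splitOnMax_go_eq pair (pair.length + 1) [] [] (Nat.le_succ _)
  simp only [PySem.Chars.splitOnMax] at *
  norm_num at this ⊢
  cases hse : splitEq pair with
  | none => simpa [hse] using this
  | some ab => simpa [hse] using this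

theorem splitEq_none_iff (l : List Char) : splitEq l = none ↔ '=' ∉ l := by
  induction l with
  | nil => simp [splitEq]
  | cons c cs ih =>
    by_cases hc : c = '=' <;> simp [splitEq, hc, ih, eq_comm]

theorem isIn_eq_mem (pair : List Char) : PySem.Chars.isIn ['='] pair = true ↔ '=' ∈ pair := by
  rw [PySem.Chars.isIn_iff_infix]
  constructor
  · intro h; exact h.mem (by simp)
  · intro h
    obtain ⟨a, b, rfl⟩ := List.mem_iff_append.mp h
    exact ⟨a, b, by simp⟩

-- A's loop body equals procA
theorem stepA_eq_procA (d : PySem.Dict (List Char) (List Char)) (pair : List Char) :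
    (if PySem.Chars.isIn ['='] pair then
        match PySem.Chars.splitOnMax pair ['='] 1 with
        | [k, v] => d.insert k v
        | _ => d
      else d) = procA d pair := by
  cases hse : splitEq pair with
  | none =>
    have : '=' ∉ pair := (splitEq_none_iff pair).mp hse
    have hin : PySem.Chars.isIn ['='] pair = false := by
      cases hb : PySem.Chars.isIn ['='] pair
      · rfl
      · exact absurd ((isIn_eq_mem pair).mp hb) this
    simp [hin, procA, hse]
  | some ab =>
    have hmem : '=' ∈ pair := by
      by_contra hn
      rw [← splitEq_none_iff] at hn
      simp [hn] at hse
    have hin : PySem.Chars.isIn ['='] pair = true := (isIn_eq_mem pair).mpr hmem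
    simp [hin, splitOnMax_eq, hse, procA]

theorem splitEq_append (k buf : List Char) (hk : '=' ∉ k) :
    splitEq (k ++ '=' :: buf) = some (k, buf) := by
  induction k with
  | nil => simp [splitEq]
  | cons c cs ih =>
    have hc : c ≠ '=' := by intro h; exact hk (by simp [h])
    simp only [List.cons_append, splitEq, if_neg hc,
      ih (fun h => hk (List.mem_cons_of_mem _ h))]
    rfl

-- invariant of B's scan state: the part before a pending '=' never contains '='
def pfInv : Option (List Char) → List Char → Prop
  | none, buf => '=' ∉ buf
  | some k, _ => '=' ∉ k

-- the partial segment that B's scan state (okey, buf) has consumed so far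
def pfPartial (okey : Option (List Char)) (buf : List Char) : List Char :=
  match okey with
  | none => buf
  | some k => k ++ '=' :: buf

theorem procA_partial (d : PySem.Dict (List Char) (List Char)) (okey : Option (List Char))
    (buf : List Char)
    (hinv : pfInv okey buf) :
    procA d (pfPartial okey buf) = pfFinish (d, okey, buf) := by
  cases okey with
  | none =>
    have : splitEq buf = none := (splitEq_none_iff buf).mpr hinv
    simp [pfPartial, pfFinish, procA, this]
  | some k =>
    simp [pfPartial, pfFinish, procA, splitEq_append k buf hinv]

theorem scan_lemma (s : List Char) : ∀ (d : PySem.Dict (List Char) (List Char))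
    (okey : Option (List Char)) (buf : List Char),
    pfInv okey buf →
    pfFinish (s.foldl pfScanStep (d, okey, buf))
      = ((splitBar s).2).foldl procA (procA d (pfPartial okey buf ++ (splitBar s).1)) := by
  induction s with
  | nil =>
    intro d okey buf hinv
    simp [splitBar, procA_partial d okey buf hinv]
  | cons c rest ih =>
    intro d okey buf hinv
    by_cases hbar : c = '|'
    · subst hbar
      rw [show List.foldl pfScanStep (d, okey, buf) ('|' :: rest)
            = List.foldl pfScanStep (pfFinish (d, okey, buf), none, []) rest by
          cases okey <;> simp [pfScanStep, pfFinish]]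
      rw [ih (pfFinish (d, okey, buf)) none [] (by simp [pfInv]),
        ← procA_partial d okey buf hinv]
      simp [splitBar, pfPartial]
    · by_cases heq : c = '=' ∧ okey = none
      · obtain ⟨rfl, rfl⟩ := heq
        rw [show List.foldl pfScanStep (d, none, buf) ('=' :: rest)
              = List.foldl pfScanStep (d, some buf, []) rest by
            simp [pfScanStep, hbar]]
        rw [ih d (some buf) [] hinv]
        simp [splitBar, hbar, pfPartial]
      · rw [show List.foldl pfScanStep (d, okey, buf) (c :: rest)
              = List.foldl pfScanStep (d, okey, buf ++ [c]) rest by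
            simp [pfScanStep, hbar, heq]]
        have hinv' : pfInv okey (buf ++ [c]) := by
          cases okey with
          | none =>
            have hc : c ≠ '=' := by
              intro h
              exact heq ⟨h, rfl⟩
            simp only [pfInv] at hinv ⊢
            simp [hinv, Ne.symm hc]
          | some k => exact hinv
        rw [ih d okey (buf ++ [c]) hinv']
        cases okey <;> simp [splitBar, hbar, pfPartial]

-- ===== VERDICT (by name: the statement is the Claim_ definition above) =====
theorem parse_feats_spec : Claim_equal_parse_feats := by
  intro feats_str _
  unfold Spec_parse_feats parse_feats parse_feats_alt
  cases feats_str with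
  | none => rfl
  | some s =>
    by_cases hs : s.toList = []
    · simp [hs]
    · simp only [if_neg hs]
      congr 1
      have hA : (fun (d : PySem.Dict (List Char) (List Char)) pair =>
          if PySem.Chars.isIn ['='] pair then
            match PySem.Chars.splitOnMax pair ['='] 1 with
            | [k, v] => d.insert k v
            | _ => d
          else d) = procA := by
        funext d pair
        exact stepA_eq_procA d pair
      rw [hA, splitOn_bar, List.foldl_cons]
      have hB := scan_lemma s.toList PySem.Dict.empty none [] (by simp [pfInv])
      simp only [pfPartial, List.nil_append] at hB
      rw [hB]
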